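-- pv_equiv track=rewrite | github.com/medusabci/medusa-analyzer | Segmentation/utils.py | find_valid_conditions
-- ===== SOURCE A (Python) =====
-- def find_valid_conditions(vector):
--     """
--     Find the index of the init of all the valid conditions
--
--     Args:
--         vector (list or array): numerical vector
--
--     Returns:
--         list: Indices of valid conditions
--     """
--     indices = []
--     i = 0
--     while i < len(vector) - 1:
--         if vector[i] == vector[i + 1]:
--             indices.append(i)
--             i += 2  # The next iteration will be skipped, as it is the end of the current condition
--         else:
--             i += 1
--     return indices
-- ===== SOURCE B (Python) =====
-- def find_valid_conditions(vector):
--     n = len(vector)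
--     cands = [i for i in range(n - 1) if vector[i] == vector[i + 1]]
--     indices = []
--     nxt = 0
--     for c in cands:
--         if c >= nxt:
--             indices.append(c)
--             nxt = c + 2
--     return indices
-- ===== Notes on version B (the rewrite author's own statement) =====
-- stated objective: alternative
-- what changed: Replaced the single while-loop with index jumps (i += 2 / i += 1) by two passes: first a filter collecting all adjacent-equal positions, then a greedy watermark selection over that candidate list reproducing the skip-by-2 semantics.
import Mathlib
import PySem

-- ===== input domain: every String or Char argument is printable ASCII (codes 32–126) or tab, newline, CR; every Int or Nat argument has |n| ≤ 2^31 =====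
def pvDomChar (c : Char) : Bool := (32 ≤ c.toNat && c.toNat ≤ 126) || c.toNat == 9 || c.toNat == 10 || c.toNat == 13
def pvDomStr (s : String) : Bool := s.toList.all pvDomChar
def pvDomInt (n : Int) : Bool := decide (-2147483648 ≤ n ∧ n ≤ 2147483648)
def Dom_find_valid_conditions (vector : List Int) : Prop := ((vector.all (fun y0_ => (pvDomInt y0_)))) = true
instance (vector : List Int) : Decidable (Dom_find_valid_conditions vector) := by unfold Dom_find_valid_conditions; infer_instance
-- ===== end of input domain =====

-- B replaces A's single index-jumping while loop by two passes (filter adjacent-equal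
-- positions, then greedy watermark selection); alternative decomposition, same cost.

-- ===== PORT A =====
-- While loop of A: i always satisfies 0 ≤ i and i+1 < len when indexing, so
-- `getD _ 0` is exactly Python's vector[i] here (never out of range).
def pvALoop (v : List Int) (i : Nat) (indices : List Int) : List Int :=
  if i < v.length - 1 then
    if v.getD i 0 == v.getD (i + 1) 0 then
      pvALoop v (i + 2) (indices ++ [(i : Int)])
    else
      pvALoop v (i + 1) indices
  else indices
termination_by v.length - 1 - i
decreasing_by all_goals omega

def find_valid_conditions (vector : List Int) : List Int :=
  pvALoop vector 0 []

-- ===== PORT B =====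
-- the greedy selection loop of Source B, folded over the candidate list with state (indices, nxt)
def find_valid_conditions_alt (vector : List Int) : List Int :=
  let n := vector.length
  let cands := (List.range (n - 1)).filter (fun i => vector.getD i 0 == vector.getD (i + 1) 0)
  (cands.foldl (fun (st : List Int × Nat) c =>
      if st.2 ≤ c then (st.1 ++ [(c : Int)], c + 2) else st) ([], 0)).1

-- ===== PRECONDITION & SPEC =====
def Spec_find_valid_conditions (vector : List Int) (out : List Int) : Prop := out = find_valid_conditions_alt vector
instance (vector : List Int) (out : List Int) : Decidable (Spec_find_valid_conditions vector out) := by unfold Spec_find_valid_conditions; infer_instance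

-- ===== CLAIM (what is proved, stated in full; the proofs are below) =====
def Claim_equal_find_valid_conditions : Prop := ∀ (vector : List Int), Dom_find_valid_conditions vector → Spec_find_valid_conditions vector (find_valid_conditions vector)

-- ===== LEMMAS AND PROOFS =====

-- cons-building version of B's selection loop, used as the bridge in the proof
def pvSelect (cs : List Nat) (nxt : Nat) : List Int :=
  match cs with
  | [] => []
  | c :: rest => if nxt ≤ c then (c : Int) :: pvSelect rest (c + 2) else pvSelect rest nxt

-- candidates at positions ≥ i
def pvCF (v : List Int) (i : Nat) : List Nat :=
  (List.range' i (v.length - 1 - i)).filter (fun j => v.getD j 0 == v.getD (j + 1) 0)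

lemma pvCF_mem {v : List Int} {i c : Nat} (h : c ∈ pvCF v i) : i ≤ c := by
  unfold pvCF at h
  have := (List.mem_filter.mp h).1
  have := List.mem_range'_1.mp this
  omega

lemma pvSelect_mono (cs : List Nat) (n' n : Nat) (h : n' ≤ n)
    (hall : ∀ c ∈ cs, n ≤ c) : pvSelect cs n' = pvSelect cs n := by
  cases cs with
  | nil => rfl
  | cons c rest =>
      have hc : n ≤ c := hall c (List.mem_cons_self ..)
      simp [pvSelect, Nat.le_trans h hc, hc]

lemma pvCF_step {v : List Int} {i : Nat} (h : i < v.length - 1) :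
    pvCF v i = if v.getD i 0 == v.getD (i + 1) 0
               then i :: pvCF v (i + 1) else pvCF v (i + 1) := by
  unfold pvCF
  have h1 : v.length - 1 - i = (v.length - 1 - (i + 1)) + 1 := by omega
  rw [h1, List.range'_succ, List.filter_cons]

lemma pvCF_empty {v : List Int} {i : Nat} (h : ¬ i < v.length - 1) :
    pvCF v i = [] := by
  unfold pvCF
  have : v.length - 1 - i = 0 := by omega
  simp [this]

lemma pvKey (k : Nat) : ∀ (v : List Int) (i : Nat) (acc : List Int),
    v.length - 1 - i ≤ k → pvALoop v i acc = acc ++ pvSelect (pvCF v i) i := by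
  induction k with
  | zero =>
      intro v i acc h
      have hlt : ¬ i < v.length - 1 := by omega
      rw [pvALoop, if_neg hlt, pvCF_empty hlt]
      simp [pvSelect]
  | succ k ih =>
      intro v i acc h
      by_cases hlt : i < v.length - 1
      · rw [pvALoop, if_pos hlt, pvCF_step hlt]
        by_cases hp : v.getD i 0 == v.getD (i + 1) 0
        · rw [if_pos hp, if_pos hp, ih v (i + 2) _ (by omega)]
          have hsel : pvSelect (pvCF v (i + 1)) (i + 2) = pvSelect (pvCF v (i + 2)) (i + 2) := by
            by_cases h2 : i + 1 < v.length - 1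
            · rw [pvCF_step h2]
              split
              · simp [pvSelect]
              · rfl
            · rw [pvCF_empty h2, pvCF_empty (by omega)]
          simp [pvSelect, hsel]
        · rw [if_neg hp, if_neg hp, ih v (i + 1) _ (by omega)]
          have : pvSelect (pvCF v (i + 1)) (i + 1) = pvSelect (pvCF v (i + 1)) i := by
            exact (pvSelect_mono _ i (i + 1) (by omega) (fun c hc => pvCF_mem hc)).symm
          rw [this]
      · rw [pvALoop, if_neg hlt, pvCF_empty hlt]
        simp [pvSelect]

lemma pvFoldl_select (cs : List Nat) : ∀ (acc : List Int) (nxt : Nat),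
    (cs.foldl (fun (st : List Int × Nat) c =>
      if st.2 ≤ c then (st.1 ++ [(c : Int)], c + 2) else st) (acc, nxt)).1
    = acc ++ pvSelect cs nxt := by
  induction cs with
  | nil => intro acc nxt; simp [pvSelect]
  | cons c rest ih =>
      intro acc nxt
      simp only [List.foldl_cons, pvSelect]
      by_cases h : nxt ≤ c
      · rw [if_pos h, if_pos h, ih]; simp
      · rw [if_neg h, if_neg h, ih]

-- ===== VERDICT (by name: the statement is the Claim_ definition above) =====
theorem find_valid_conditions_spec : Claim_equal_find_valid_conditions := by
  intro v _
  unfold Spec_find_valid_conditions find_valid_conditions find_valid_conditions_alt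
  rw [pvKey (v.length - 1 - 0) v 0 [] (le_refl _), pvFoldl_select]
  have : pvCF v 0 = (List.range (v.length - 1)).filter
      (fun i => v.getD i 0 == v.getD (i + 1) 0) := by
    unfold pvCF
    rw [List.range_eq_range']
    simp
  rw [this]
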